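-- pv_equiv track=rewrite | github.com/Vamber/ML_Stock | Utils/sentiment_scoring_strategy.py | refine_sentence_by_keywords
-- ===== SOURCE A (Python) =====
-- def contained_by_keyword(word, lst_of_keyword):
-- 	augmented_lst_of_keyword = []
-- 	for keyword in lst_of_keyword:
-- 		augmented_lst_of_keyword.append(keyword.lower())
-- 	word = word.lower()
-- 	for w in augmented_lst_of_keyword:
-- 		if w in word:
-- 			return True
--
-- def refine_sentence_by_keywords(sentence, lst_of_keyword):
-- 	min_setence_length = 5
--
-- 	split_sentence = sentence.split(" ")
-- 	key_word_first_appeared_index = 0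
-- 	for word in split_sentence:
-- 		if contained_by_keyword(word, lst_of_keyword) :
-- 			break
-- 		key_word_first_appeared_index += 1
--
-- 	refined_sentence = split_sentence[key_word_first_appeared_index:]
--
-- 	if len(refined_sentence) >= min_setence_length:
-- 		return ' '.join(refined_sentence)
-- ===== SOURCE B (Python) =====
-- def refine_sentence_by_keywords(sentence, lst_of_keyword):
--     split_sentence = sentence.split(" ")
--     words = [w.lower() for w in split_sentence]
--     n = len(words)
--     cut = n
--     for keyword in lst_of_keyword:
--         k = keyword.lower()
--         hit = next((i for i, w in enumerate(words) if k in w), n)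
--         if hit < cut:
--             cut = hit
--     refined = split_sentence[cut:]
--     if len(refined) >= 5:
--         return ' '.join(refined)
-- ===== Notes on version B (the rewrite author's own statement) =====
-- stated objective: alternative
-- what changed: Replaces A's outer per-word scan with an early break (re-lowercasing the keyword list for every word) by lowercasing the word list once and computing, per keyword, the first word index containing it, taking the minimum of these first-hit indices as the cut point.
import Mathlib
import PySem

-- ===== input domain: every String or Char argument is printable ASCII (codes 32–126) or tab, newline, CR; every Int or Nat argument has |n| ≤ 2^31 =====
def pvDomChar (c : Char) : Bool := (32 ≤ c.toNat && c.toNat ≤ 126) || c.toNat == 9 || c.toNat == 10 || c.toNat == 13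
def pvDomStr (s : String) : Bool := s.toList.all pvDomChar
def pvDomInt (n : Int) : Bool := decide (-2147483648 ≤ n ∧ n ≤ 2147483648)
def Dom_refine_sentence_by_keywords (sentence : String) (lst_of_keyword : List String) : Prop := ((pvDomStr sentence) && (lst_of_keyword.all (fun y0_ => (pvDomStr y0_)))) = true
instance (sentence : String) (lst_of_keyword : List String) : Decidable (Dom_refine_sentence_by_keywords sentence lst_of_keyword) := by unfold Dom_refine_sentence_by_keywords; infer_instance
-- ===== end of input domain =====

-- B replaces A's per-word scan with its break-on-first-keyword-hit by a per-keyword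
-- first-hit index over a once-lowercased word list, taking the minimum as the cut point
-- (objective: alternative decomposition; same exact return value).

-- ===== PORT A =====
-- sentence.split(" "): sep ≠ "", so PySem.Str.split? is always some (exact)
def pvSplit (sentence : String) : List String := (PySem.Str.split? sentence " ").getD []

-- A's helper loop 'for keyword in lst: augmented.append(keyword.lower())'
def pvLowerAll (lst : List String) : List String :=
  lst.foldl (fun acc keyword => acc ++ [PySem.Str.lower keyword]) []

-- A's helper loop 'for w in augmented: if w in word: return True' (falls off → None, used as False)
def pvAnyIn : List String → String → Bool
  | [], _ => false
  | w :: ws, word => if PySem.Str.isIn w word then true else pvAnyIn ws word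

def contained_by_keyword (word : String) (lst_of_keyword : List String) : Bool :=
  pvAnyIn (pvLowerAll lst_of_keyword) (PySem.Str.lower word)

-- A's main loop: count words until 'contained_by_keyword' breaks
def pvScan (lst : List String) : List String → Nat
  | [] => 0
  | word :: rest => if contained_by_keyword word lst then 0 else pvScan lst rest + 1

def refine_sentence_by_keywords (sentence : String) (lst_of_keyword : List String) : Option String :=
  let split_sentence := pvSplit sentence
  let key_word_first_appeared_index := pvScan lst_of_keyword split_sentence
  -- split_sentence[idx:] with a nonnegative index (exact: PySem.List.slice_from_natCast)
  let refined_sentence := split_sentence.drop key_word_first_appeared_index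
  if 5 ≤ refined_sentence.length then some (PySem.Str.join " " refined_sentence) else none

-- ===== PORT B =====
def refine_sentence_by_keywords_alt (sentence : String) (lst_of_keyword : List String) : Option String :=
  let split_sentence := pvSplit sentence
  let words := split_sentence.map PySem.Str.lower
  let n := words.length
  -- per keyword, first index whose (lowercased) word contains it, defaulting to n; keep the minimum
  let cut := lst_of_keyword.foldl (fun c keyword =>
      let hit := (words.findIdx? (fun w => PySem.Str.isIn (PySem.Str.lower keyword) w)).getD n
      if hit < c then hit else c) n
  let refined := split_sentence.drop cut
  if 5 ≤ refined.length then some (PySem.Str.join " " refined) else none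

-- ===== PRECONDITION & SPEC =====
def Spec_refine_sentence_by_keywords (sentence : String) (lst_of_keyword : List String) (out : Option String) : Prop := out = refine_sentence_by_keywords_alt sentence lst_of_keyword
instance (sentence : String) (lst_of_keyword : List String) (out : Option String) : Decidable (Spec_refine_sentence_by_keywords sentence lst_of_keyword out) := by unfold Spec_refine_sentence_by_keywords; infer_instance

-- ===== CLAIM (what is proved, stated in full; the proofs are below) =====
def Claim_equal_refine_sentence_by_keywords : Prop := ∀ (sentence : String) (lst_of_keyword : List String), Dom_refine_sentence_by_keywords sentence lst_of_keyword → Spec_refine_sentence_by_keywords sentence lst_of_keyword (refine_sentence_by_keywords sentence lst_of_keyword)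

-- ===== LEMMAS AND PROOFS =====

-- A's list-building fold is map lower
theorem pvLowerAll_eq (lst : List String) : pvLowerAll lst = lst.map PySem.Str.lower := by
  have h : ∀ (l : List String) (acc : List String),
      l.foldl (fun acc keyword => acc ++ [PySem.Str.lower keyword]) acc = acc ++ l.map PySem.Str.lower := by
    intro l
    induction l with
    | nil => simp
    | cons x xs ih => intro acc; rw [List.foldl_cons, ih]; simp
  exact (h lst []).trans (List.nil_append _)

theorem pvAnyIn_eq_any (l : List String) (word : String) :
    pvAnyIn l word = l.any (fun w => PySem.Str.isIn w word) := by
  induction l with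
  | nil => rfl
  | cons x xs ih => cases h : PySem.Str.isIn x word <;> simp only [pvAnyIn, h, ih, List.any_cons] <;> simp
    

theorem contained_eq_any (word : String) (lst : List String) :
    contained_by_keyword word lst
      = lst.any (fun k => PySem.Str.isIn (PySem.Str.lower k) (PySem.Str.lower word)) := by
  simp [contained_by_keyword, pvLowerAll_eq, pvAnyIn_eq_any, List.any_map, Function.comp_def,
    PySem.Str.isIn, PySem.Str.toList_lower]

-- A's counting loop is findIdx
theorem pvScan_eq_findIdx (lst : List String) (ws : List String) :
    pvScan lst ws = ws.findIdx (fun w => contained_by_keyword w lst) := by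
  induction ws with
  | nil => rfl
  | cons x xs ih => cases h : contained_by_keyword x lst <;> simp [pvScan, List.findIdx_cons, h, ih]

-- defaulted findIdx? is findIdx
theorem getD_findIdx? {α : Type} (p : α → Bool) (xs : List α) :
    (xs.findIdx? p).getD xs.length = xs.findIdx p := by
  cases h : xs.findIdx? p with
  | none =>
    have := List.findIdx?_eq_none_iff.mp h
    simp [List.findIdx_eq_length.mpr this]
  | some i =>
    have := (List.findIdx?_eq_some_iff_findIdx_eq.mp h).2
    simp [this]

-- findIdx is monotone under pointwise implication
theorem findIdx_mono {α : Type} (p q : α → Bool) (h : ∀ x, q x = true → p x = true)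
    (xs : List α) : xs.findIdx p ≤ xs.findIdx q := by
  induction xs with
  | nil => simp
  | cons x xs ih =>
    cases hq : q x with
    | true => simp [List.findIdx_cons, hq, h x hq]
    | false =>
      simp only [List.findIdx_cons, hq, cond_false]
      cases hp : p x with
      | true => simp
      | false => simp only [cond_false]; omega

-- an index satisfying p bounds findIdx
theorem findIdx_le_of_getElem {α : Type} (p : α → Bool) (xs : List α) (i : Nat)
    (hi : i < xs.length) (hp : p (xs[i]'hi) = true) : xs.findIdx p ≤ i := by
  induction xs generalizing i with
  | nil => simp at hi
  | cons x xs ih =>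
    cases i with
    | zero => simp_all [List.findIdx_cons]
    | succ j =>
      simp only [List.findIdx_cons]
      cases hpx : p x with
      | true => simp
      | false =>
        simp only [cond_false]
        have := ih j (by simpa using hi) (by simpa using hp)
        omega

-- the fold over keywords never exceeds its accumulator, is below every member's value,
-- and dominates any common lower bound
theorem fold_min_le_init (F : String → Nat) (kws : List String) (c : Nat) :
    kws.foldl (fun c k => if F k < c then F k else c) c ≤ c := by
  induction kws generalizing c with
  | nil => simp
  | cons k ks ih =>
    simp only [List.foldl_cons]
    have := ih (if F k < c then F k else c)
    split_ifs at * <;> omega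

theorem fold_min_le_mem (F : String → Nat) (kws : List String) (c : Nat) (k : String)
    (hk : k ∈ kws) : kws.foldl (fun c k => if F k < c then F k else c) c ≤ F k := by
  induction kws generalizing c with
  | nil => simp at hk
  | cons x xs ih =>
    simp only [List.foldl_cons]
    rcases List.mem_cons.mp hk with h | h
    · subst h
      have := fold_min_le_init F xs (if F k < c then F k else c)
      split_ifs at * <;> omega
    · exact ih _ h

theorem le_fold_min (F : String → Nat) (kws : List String) (c a : Nat)
    (hc : a ≤ c) (hmem : ∀ k ∈ kws, a ≤ F k) :
    a ≤ kws.foldl (fun c k => if F k < c then F k else c) c := by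
  induction kws generalizing c with
  | nil => simpa
  | cons x xs ih =>
    simp only [List.foldl_cons]
    refine ih _ ?_ (fun k hk => hmem k (List.mem_cons_of_mem _ hk))
    have := hmem x (List.mem_cons_self)
    split_ifs <;> omega

-- core: A's break index equals B's minimum of per-keyword first-hit indices
theorem cut_eq (ws kws : List String) :
    pvScan kws ws
      = kws.foldl (fun c k =>
          if (ws.findIdx? (fun w => PySem.Str.isIn (PySem.Str.lower k) (PySem.Str.lower w))).getD ws.length < c
          then (ws.findIdx? (fun w => PySem.Str.isIn (PySem.Str.lower k) (PySem.Str.lower w))).getD ws.length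
          else c) ws.length := by
  have hFeq : ∀ k : String,
      (ws.findIdx? (fun w => PySem.Str.isIn (PySem.Str.lower k) (PySem.Str.lower w))).getD ws.length
        = ws.findIdx (fun w => PySem.Str.isIn (PySem.Str.lower k) (PySem.Str.lower w)) :=
    fun k => getD_findIdx? _ ws
  rw [pvScan_eq_findIdx]
  apply Nat.le_antisymm
  · -- A's first break is below every per-keyword first hit and below ws.length
    apply le_fold_min _ kws ws.length _ List.findIdx_le_length
    intro k hk
    rw [hFeq k]
    apply findIdx_mono
    intro w hw
    rw [contained_eq_any]
    exact List.any_eq_true.mpr ⟨k, hk, hw⟩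
  · have key : ∀ (i : Nat) (h : i < ws.length),
        contained_by_keyword (ws[i]'h) kws = true →
        kws.foldl (fun c k =>
          if (ws.findIdx? (fun w => PySem.Str.isIn (PySem.Str.lower k) (PySem.Str.lower w))).getD ws.length < c
          then (ws.findIdx? (fun w => PySem.Str.isIn (PySem.Str.lower k) (PySem.Str.lower w))).getD ws.length
          else c) ws.length ≤ i := by
      intro i h hp
      rw [contained_eq_any] at hp
      obtain ⟨k, hk, hq⟩ := List.any_eq_true.mp hp
      calc _ ≤ _ := fold_min_le_mem _ kws ws.length k hk
        _ ≤ i := by rw [hFeq k]; exact findIdx_le_of_getElem _ ws i h hq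
    by_cases hex : ∃ w ∈ ws, contained_by_keyword w kws = true
    · have hlt : ws.findIdx (fun w => contained_by_keyword w kws) < ws.length :=
        List.findIdx_lt_length_of_exists hex
      exact key _ hlt (by simpa using List.findIdx_getElem (w := hlt))
    · push Not at hex
      have h0 : ws.findIdx (fun w => contained_by_keyword w kws) = ws.length :=
        List.findIdx_eq_length.mpr (by
          intro x hx
          simpa using hex x hx)
      rw [h0]
      exact fold_min_le_init _ kws ws.length

-- ===== VERDICT (by name: the statement is the Claim_ definition above) =====
theorem refine_sentence_by_keywords_spec : Claim_equal_refine_sentence_by_keywords := by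
  intro sentence lst _
  unfold Spec_refine_sentence_by_keywords refine_sentence_by_keywords refine_sentence_by_keywords_alt
  simp only [List.findIdx?_map, List.length_map, Function.comp_def]
  rw [cut_eq (pvSplit sentence) lst]
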